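-- pv_equiv track=rewrite | github.com/is443-eng/ai-data-science-team-w | Tool V3/deployment/deploy_me.py | redact_argv_for_print
-- ===== SOURCE A (Python) =====
-- def redact_argv_for_print(cmd: list[str]) -> str:
--     """Hide API keys and ``-E name=value`` secrets in logged argv."""
--     out: list[str] = []
--     i = 0
--     while i < len(cmd):
--         a = cmd[i]
--         if a in ("--api-key", "-k") and i + 1 < len(cmd):
--             out.extend([a, "<redacted>"])
--             i += 2
--             continue
--         if a == "-E" and i + 1 < len(cmd):
--             nxt = cmd[i + 1]
--             if "=" in nxt:
--                 out.extend(["-E", "<redacted>"])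
--             else:
--                 out.extend(["-E", nxt])
--             i += 2
--             continue
--         out.append(a)
--         i += 1
--     return " ".join(out)
-- ===== SOURCE B (Python) =====
-- def redact_argv_for_print(cmd: list[str]) -> str:
--     """Hide API keys and ``-E name=value`` secrets in logged argv."""
--     out: list[str] = []
--     state = 0  # 0 = normal, 1 = previous token takes a secret value, 2 = previous token was -E
--     for tok in cmd:
--         if state == 1:
--             out.append("<redacted>")
--             state = 0
--         elif state == 2:
--             out.append("<redacted>" if "=" in tok else tok)
--             state = 0
--         else:
--             out.append(tok)
--             if tok in ("--api-key", "-k"):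
--                 state = 1
--             elif tok == "-E":
--                 state = 2
--     return " ".join(out)
-- ===== Notes on version B (the rewrite author's own statement) =====
-- stated objective: alternative
-- what changed: Replaced the index-based while loop with i+1/i+2 lookahead pair-consumption by a single for-loop state machine that remembers what the previous token expects (lookbehind state) and never indexes the list.
import Mathlib
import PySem

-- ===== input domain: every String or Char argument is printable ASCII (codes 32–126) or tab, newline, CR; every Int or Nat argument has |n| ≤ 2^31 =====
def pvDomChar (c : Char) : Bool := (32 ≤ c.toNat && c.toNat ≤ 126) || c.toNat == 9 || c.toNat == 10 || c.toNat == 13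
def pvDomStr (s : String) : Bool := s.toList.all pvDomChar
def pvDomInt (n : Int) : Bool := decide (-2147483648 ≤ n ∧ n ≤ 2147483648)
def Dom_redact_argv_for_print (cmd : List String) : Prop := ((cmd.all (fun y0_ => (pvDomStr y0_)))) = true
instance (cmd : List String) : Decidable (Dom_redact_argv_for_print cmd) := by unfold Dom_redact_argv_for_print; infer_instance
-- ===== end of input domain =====

-- B replaces A's index-based while loop with i+1/i+2 lookahead by a lookbehind state-machine
-- for-loop over the tokens (objective: alternative decomposition, same O(n) cost).

-- ===== PORT A =====
-- A's while loop over index i, with pair consumption (i += 2) on secret-taking flags.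
def pvLoopA (cmd : List String) (out : List String) (i : Nat) : List String :=
  if h1 : i < cmd.length then
    let a := cmd[i]
    if (a = "--api-key" ∨ a = "-k") ∧ i + 1 < cmd.length then
      pvLoopA cmd (out ++ [a, "<redacted>"]) (i + 2)
    else if h2 : a = "-E" ∧ i + 1 < cmd.length then
      let nxt := cmd[i + 1]'h2.2
      if PySem.Str.isIn "=" nxt then
        pvLoopA cmd (out ++ ["-E", "<redacted>"]) (i + 2)
      else
        pvLoopA cmd (out ++ ["-E", nxt]) (i + 2)
    else
      pvLoopA cmd (out ++ [a]) (i + 1)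
  else out
termination_by cmd.length - i

def redact_argv_for_print (cmd : List String) : String :=
  PySem.Str.join " " (pvLoopA cmd [] 0)

-- ===== PORT B =====
-- B's state machine: state 0 = normal, 1 = previous token takes a secret value, 2 = previous was -E.
def pvStepB (acc : List String × Nat) (tok : String) : List String × Nat :=
  let out := acc.1
  let st := acc.2
  if st = 1 then (out ++ ["<redacted>"], 0)
  else if st = 2 then (out ++ [if PySem.Str.isIn "=" tok then "<redacted>" else tok], 0)
  else
    (out ++ [tok],
      if tok = "--api-key" ∨ tok = "-k" then 1 else if tok = "-E" then 2 else 0)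

def redact_argv_for_print_alt (cmd : List String) : String :=
  PySem.Str.join " " (cmd.foldl pvStepB ([], 0)).1

-- ===== PRECONDITION & SPEC =====
def Spec_redact_argv_for_print (cmd : List String) (out : String) : Prop := out = redact_argv_for_print_alt cmd
instance (cmd : List String) (out : String) : Decidable (Spec_redact_argv_for_print cmd out) := by unfold Spec_redact_argv_for_print; infer_instance

-- ===== CLAIM (what is proved, stated in full; the proofs are below) =====
def Claim_equal_redact_argv_for_print : Prop := ∀ (cmd : List String), Dom_redact_argv_for_print cmd → Spec_redact_argv_for_print cmd (redact_argv_for_print cmd)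

-- ===== LEMMAS AND PROOFS =====

-- the common "spine": the redacted token list both loops produce
def pvGo : List String → List String
  | [] => []
  | [a] => [a]
  | a :: b :: rest =>
    if a = "--api-key" ∨ a = "-k" then a :: "<redacted>" :: pvGo rest
    else if a = "-E" then
      a :: (if PySem.Str.isIn "=" b then "<redacted>" else b) :: pvGo rest
    else a :: pvGo (b :: rest)

lemma pvLoopA_eq (cmd : List String) :
    ∀ (out : List String) (i : Nat), pvLoopA cmd out i = out ++ pvGo (List.drop i cmd) := by
  intro out i
  induction out, i using pvLoopA.induct cmd with
  | case1 out i h1 a hflag ih =>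
    rw [pvLoopA]
    simp only [h1, dif_pos]
    rw [if_pos hflag, ih]
    have hd : List.drop i cmd = cmd[i] :: cmd[i+1]'hflag.2 :: List.drop (i+2) cmd := by
      rw [List.drop_eq_getElem_cons h1, List.drop_eq_getElem_cons hflag.2]
    rw [hd, pvGo, if_pos hflag.1]
    simp
    rfl
  | case2 out i h1 a hnf h2 nxt heq ih =>
    rw [pvLoopA]
    simp only [h1, dif_pos]
    rw [if_neg hnf, dif_pos h2, if_pos heq, ih]
    have hE : cmd[i] = "-E" := h2.1
    have hfl : ¬ (cmd[i] = "--api-key" ∨ cmd[i] = "-k") := by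
      intro hc; exact hnf ⟨hc, h2.2⟩
    have hd : List.drop i cmd = cmd[i] :: cmd[i+1]'h2.2 :: List.drop (i+2) cmd := by
      rw [List.drop_eq_getElem_cons h1, List.drop_eq_getElem_cons h2.2]
    rw [hd, pvGo, if_neg hfl, if_pos hE, if_pos heq, hE]
    simp
  | case3 out i h1 a hnf h2 nxt heq ih =>
    rw [pvLoopA]
    simp only [h1, dif_pos]
    rw [if_neg hnf, dif_pos h2, if_neg heq, ih]
    have hE : cmd[i] = "-E" := h2.1
    have hfl : ¬ (cmd[i] = "--api-key" ∨ cmd[i] = "-k") := by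
      intro hc; exact hnf ⟨hc, h2.2⟩
    have hd : List.drop i cmd = cmd[i] :: cmd[i+1]'h2.2 :: List.drop (i+2) cmd := by
      rw [List.drop_eq_getElem_cons h1, List.drop_eq_getElem_cons h2.2]
    rw [hd, pvGo, if_neg hfl, if_pos hE, if_neg heq, hE]
    simp
    rfl
  | case4 out i h1 a hnf hne ih =>
    rw [pvLoopA]
    simp only [h1, dif_pos]
    rw [if_neg hnf, dif_neg hne, ih]
    rw [List.drop_eq_getElem_cons h1]
    by_cases hnext : i + 1 < cmd.length
    · have hd2 : List.drop (i+1) cmd = cmd[i+1] :: List.drop (i+2) cmd :=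
        List.drop_eq_getElem_cons hnext
      have hfl : ¬ (cmd[i] = "--api-key" ∨ cmd[i] = "-k") := fun hc => hnf ⟨hc, hnext⟩
      have hE : cmd[i] ≠ "-E" := fun hc => hne ⟨hc, hnext⟩
      rw [hd2, pvGo, if_neg hfl, if_neg hE, ← hd2]
      simp
      rfl
    · have hnil : List.drop (i+1) cmd = [] := List.drop_eq_nil_of_le (by omega)
      rw [hnil, pvGo]
      simp
      rw [pvGo]
  | case5 out i h1 =>
    rw [pvLoopA]
    simp only [h1, dif_neg, not_false_iff]
    rw [List.drop_eq_nil_of_le (by omega), pvGo, List.append_nil]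

lemma pvFoldB_eq : ∀ (l : List String), ∀ (out : List String),
    (l.foldl pvStepB (out, 0)).1 = out ++ pvGo l := by
  intro l
  induction l using pvGo.induct with
  | case1 => intro out; simp [pvGo]
  | case2 a =>
    intro out
    simp only [List.foldl_cons, List.foldl_nil, pvStepB, pvGo]
    norm_num
  | case3 a b rest hfl ih =>
    intro out
    simp only [List.foldl_cons]
    rw [pvGo, if_pos hfl]
    have s1 : pvStepB (out, 0) a = (out ++ [a], 1) := by
      simp [pvStepB, if_pos hfl]
    have s2 : pvStepB (out ++ [a], 1) b = (out ++ [a, "<redacted>"], 0) := by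
      simp [pvStepB]
    rw [s1, s2, ih]
    simp
  | case4 b rest hne ih =>
    intro out
    simp only [List.foldl_cons]
    rw [pvGo, if_neg hne, if_pos rfl]
    have s1 : pvStepB (out, 0) "-E" = (out ++ ["-E"], 2) := by
      simp [pvStepB]
    have s2 : pvStepB (out ++ ["-E"], 2) b
        = (out ++ ["-E", if PySem.Str.isIn "=" b then "<redacted>" else b], 0) := by
      simp [pvStepB]
    rw [s1, s2, ih]
    simp
  | case5 a b rest hfl hE ih =>
    intro out
    simp only [List.foldl_cons]
    rw [pvGo, if_neg hfl, if_neg hE]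
    have s1 : pvStepB (out, 0) a = (out ++ [a], 0) := by
      simp [pvStepB, if_neg hfl, if_neg hE]
    rw [s1]
    have := ih (out ++ [a])
    simp only [List.foldl_cons] at this
    rw [this]
    simp

-- ===== VERDICT (by name: the statement is the Claim_ definition above) =====
theorem redact_argv_for_print_spec : Claim_equal_redact_argv_for_print := by
  intro cmd _
  show redact_argv_for_print cmd = redact_argv_for_print_alt cmd
  unfold redact_argv_for_print redact_argv_for_print_alt
  rw [pvLoopA_eq cmd [] 0, pvFoldB_eq cmd []]
  simp
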